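-- pv_equiv track=rewrite | github.com/Kimuksung/codewars-programmers | Programmers/광물 캐기.py | mineral_result
-- ===== SOURCE A (Python) =====
-- def mineral_result(pick, minerals):
--     maps = [[1, 1, 1], [5, 1, 1], [25, 5, 1]]
--     answer = 0
--     for mineral in minerals:
--         if mineral == "diamond":
--             material = 0
--         elif mineral == "iron":
--             material = 1
--         else:
--             material = 2
--         answer += maps[pick][material]
--     return answer
-- ===== SOURCE B (Python) =====
-- def mineral_result(pick, minerals):
--     # group-by: tally every mineral string once, then price each distinct kind
--     freq = {}
--     for m in minerals:
--         freq[m] = freq.get(m, 0) + 1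
--     dia, iron, other = [(1, 1, 1), (5, 1, 1), (25, 5, 1)][pick]
--     total = 0
--     for name, cnt in freq.items():
--         if name == "diamond":
--             total += cnt * dia
--         elif name == "iron":
--             total += cnt * iron
--         else:
--             total += cnt * other
--     return total
-- ===== Notes on version B (the rewrite author's own statement) =====
-- stated objective: alternative
-- what changed: B replaces A's per-element cost accumulation with a group-by: it first builds a frequency dict of the mineral strings, then prices each DISTINCT kind once in a second loop over the dict items (cnt * cost), using a transposed cost tuple unpacked up front.
-- outside the precondition, e.g. on mineral_result(5, []): A returns 0, B raises IndexError
import Mathlib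
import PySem

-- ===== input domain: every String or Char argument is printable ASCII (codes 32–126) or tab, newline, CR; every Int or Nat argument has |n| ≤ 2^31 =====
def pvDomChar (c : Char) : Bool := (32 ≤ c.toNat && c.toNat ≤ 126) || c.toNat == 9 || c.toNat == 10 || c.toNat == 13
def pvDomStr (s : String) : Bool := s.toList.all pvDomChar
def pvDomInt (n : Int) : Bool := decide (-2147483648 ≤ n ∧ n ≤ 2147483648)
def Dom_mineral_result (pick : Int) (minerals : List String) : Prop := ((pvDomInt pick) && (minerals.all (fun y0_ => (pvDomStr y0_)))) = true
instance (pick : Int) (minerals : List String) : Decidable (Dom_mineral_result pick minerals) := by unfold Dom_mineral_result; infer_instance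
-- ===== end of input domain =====

-- B replaces A's per-element accumulation with group-by: tally minerals into a frequency dict, then price each distinct kind once (objective: alternative).


-- ===== PORT A =====
def mineral_result (pick : Int) (minerals : List String) : Int :=
  let maps : List (List Int) := [[1, 1, 1], [5, 1, 1], [25, 5, 1]]
  minerals.foldl (fun answer mineral =>
    let material : Int := if mineral = "diamond" then 0 else if mineral = "iron" then 1 else 2
    answer + PySem.List.pyGetD (PySem.List.pyGetD maps pick []) material 0) 0

-- ===== PORT B =====
def mineral_result_alt (pick : Int) (minerals : List String) : Int :=
  -- freq = {}; for m in minerals: freq[m] = freq.get(m, 0) + 1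
  let freq : PySem.Dict String Int :=
    minerals.foldl (fun d m => d.modify m 0 (· + 1)) PySem.Dict.empty
  -- dia, iron, other = [(1,1,1),(5,1,1),(25,5,1)][pick]
  let t : Int × Int × Int :=
    PySem.List.pyGetD [((1:Int), (1:Int), (1:Int)), (5, 1, 1), (25, 5, 1)] pick (0, 0, 0)
  let dia := t.1
  let iron := t.2.1
  let other := t.2.2
  -- for name, cnt in freq.items(): total += cnt * (branch)
  freq.items.foldl (fun total p =>
    if p.1 = "diamond" then total + p.2 * dia
    else if p.1 = "iron" then total + p.2 * iron
    else total + p.2 * other) 0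

-- ===== PRECONDITION & SPEC =====
-- Pre_ excludes out-of-range pick: for nonempty minerals A raises IndexError there, and for empty
-- minerals A's returned 0 is an accident of never evaluating maps[pick], which B's indexing rejects.
def Pre_mineral_result (pick : Int) (minerals : List String) : Prop := -3 ≤ pick ∧ pick ≤ 2
instance (pick : Int) (minerals : List String) : Decidable (Pre_mineral_result pick minerals) := by unfold Pre_mineral_result; infer_instance
def pvWitness_mineral_result : Int × List String := (0, ["diamond", "iron", "stone"])

def Spec_mineral_result (pick : Int) (minerals : List String) (out : Int) : Prop := out = mineral_result_alt pick minerals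
instance (pick : Int) (minerals : List String) (out : Int) : Decidable (Spec_mineral_result pick minerals out) := by unfold Spec_mineral_result; infer_instance

-- ===== CLAIM =====
def Claim_equal_mineral_result : Prop := ∀ (pick : Int) (minerals : List String), Dom_mineral_result pick minerals → Pre_mineral_result pick minerals → Spec_mineral_result pick minerals (mineral_result pick minerals)

-- ===== LEMMAS AND PROOFS =====

-- Two folds with pointwise-equal step functions agree.
theorem foldl_ext {α β : Type} (f g : β → α → β) (l : List α) (a : β)
    (h : ∀ acc x, f acc x = g acc x) : l.foldl f a = l.foldl g a := by
  induction l generalizing a with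
  | nil => rfl
  | cons x t ih => simp only [List.foldl_cons, h, ih]

-- Summing 'if k = h then f k else 0' over a nodup list containing h picks out f h.
theorem sum_single (f : String → Int) (keys : List String) (h : String)
    (hnd : keys.Nodup) (hmem : h ∈ keys) :
    (keys.map (fun k => if k = h then f k else 0)).sum = f h := by
  induction keys with
  | nil => cases hmem
  | cons a t ih =>
    rw [List.map_cons, List.sum_cons]
    by_cases hah : a = h
    · subst hah
      have hnotmem : a ∉ t := (List.nodup_cons.1 hnd).1
      have hz : (t.map (fun k => if k = a then f k else 0)).sum = 0 := by
        apply List.sum_eq_zero; intro x hx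
        rcases List.mem_map.1 hx with ⟨k, hk, rfl⟩
        have hne : k ≠ a := fun e => hnotmem (e ▸ hk)
        simp [hne]
      simp [hz]
    · have hmem' : h ∈ t := by
        rcases List.mem_cons.1 hmem with h' | h'
        · exact absurd h'.symm hah
        · exact h'
      simp [hah, ih (List.nodup_cons.1 hnd).2 hmem']

-- Sum over distinct keys weighted by occurrence counts equals the element-wise sum.
theorem sum_counts (f : String → Int) (keys l : List String)
    (hnd : keys.Nodup) (hcov : ∀ m ∈ l, m ∈ keys) :
    (keys.map (fun k => (l.count k : Int) * f k)).sum = (l.map f).sum := by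
  induction l with
  | nil => simp
  | cons h t ih =>
    have hsplit : ∀ k, (((h :: t).count k : Int) * f k : Int)
        = (t.count k : Int) * f k + (if k = h then f k else 0) := by
      intro k
      by_cases hk : k = h
      · subst hk; simp [List.count_cons_self]; ring
      · have hcc : List.count k (h :: t) = List.count k t := by
          simp [List.count_cons]
          exact fun e => hk e.symm
        simp [hcc, hk]
    have ih' := ih (fun m hm => hcov m (List.mem_cons_of_mem _ hm))
    calc (keys.map (fun k => ((h :: t).count k : Int) * f k)).sum
        = (keys.map (fun k => (t.count k : Int) * f k + (if k = h then f k else 0))).sum := by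
          simp only [hsplit]
      _ = (keys.map (fun k => (t.count k : Int) * f k)).sum
            + (keys.map (fun k => if k = h then f k else 0)).sum := by
          simp [List.sum_map_add]
      _ = (t.map f).sum + f h := by
          rw [ih', sum_single f keys h hnd (hcov h (List.mem_cons_self))]
      _ = ((h :: t).map f).sum := by simp; ring

-- A's accumulation fold is the element-wise sum.
theorem foldA_eq (f : String → Int) (l : List String) (acc : Int) :
    l.foldl (fun a m => a + f m) acc = acc + (l.map f).sum := by
  induction l generalizing acc with
  | nil => simp
  | cons h t ih => simp [ih]; ring

-- Core: A's per-element fold with costs c0/c1/c2 equals B's fold over the counter items.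
theorem key_eq (c0 c1 c2 : Int) (l : List String) :
    l.foldl (fun a m =>
      a + (if m = "diamond" then c0 else if m = "iron" then c1 else c2)) 0
    = ((PySem.Dict.counter l).items).foldl (fun total p =>
        if p.1 = "diamond" then total + p.2 * c0
        else if p.1 = "iron" then total + p.2 * c1
        else total + p.2 * c2) 0 := by
  set f : String → Int := fun m => if m = "diamond" then c0 else if m = "iron" then c1 else c2 with hf
  rw [PySem.Dict.items_counter, List.foldl_map]
  calc l.foldl (fun a m => a + f m) 0 = (l.map f).sum := by rw [foldA_eq]; ring
    _ = ((PySem.Set.ofList l).map (fun k => (l.count k : Int) * f k)).sum := by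
        rw [sum_counts f (PySem.Set.ofList l) l (PySem.Set.nodup_ofList l)
          (fun m hm => (PySem.Set.mem_ofList l m).2 hm)]
    _ = (PySem.Set.ofList l).foldl (fun total k => total + (l.count k : Int) * f k) 0 := by
        rw [foldA_eq]; ring
    _ = _ := by
        apply foldl_ext
        intro total k
        by_cases h1 : k = "diamond" <;> by_cases h2 : k = "iron" <;> simp [hf, h1, h2]

-- The three cost cells of A's row equal B's unpacked tuple components, for every admitted pick.
theorem cell_eq (pick : Int) (h1 : -3 ≤ pick) (h2 : pick ≤ 2) :
    PySem.List.pyGetD (PySem.List.pyGetD [[1, 1, 1], [5, 1, 1], [25, 5, 1]] pick []) 0 0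
        = (PySem.List.pyGetD [((1:Int), (1:Int), (1:Int)), (5, 1, 1), (25, 5, 1)] pick (0, 0, 0)).1
    ∧ PySem.List.pyGetD (PySem.List.pyGetD [[1, 1, 1], [5, 1, 1], [25, 5, 1]] pick []) 1 0
        = (PySem.List.pyGetD [((1:Int), (1:Int), (1:Int)), (5, 1, 1), (25, 5, 1)] pick (0, 0, 0)).2.1
    ∧ PySem.List.pyGetD (PySem.List.pyGetD [[1, 1, 1], [5, 1, 1], [25, 5, 1]] pick []) 2 0
        = (PySem.List.pyGetD [((1:Int), (1:Int), (1:Int)), (5, 1, 1), (25, 5, 1)] pick (0, 0, 0)).2.2 := by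
  interval_cases pick <;> exact ⟨rfl, rfl, rfl⟩

theorem mineral_result_spec : Claim_equal_mineral_result := by
  intro pick minerals _ hpre
  show mineral_result pick minerals = mineral_result_alt pick minerals
  obtain ⟨h1, h2⟩ := hpre
  obtain ⟨hc0, hc1, hc2⟩ := cell_eq pick h1 h2
  simp only [mineral_result, mineral_result_alt, ← PySem.Dict.counter_eq_foldl]
  rw [← key_eq]
  apply foldl_ext
  intro a m
  by_cases e1 : m = "diamond" <;> by_cases e2 : m = "iron" <;>
    simp [e1, e2, ← hc0, ← hc1, ← hc2]
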